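-- pv_equiv track=rewrite | github.com/Hliran207/Distress-Detector | app/controllers/pullpush_final_stretch_controller.py | subreddit_quotas_for_total
-- ===== SOURCE A (Python) =====
-- def subreddit_quotas_for_total(
--     normalized_subs: tuple[str, ...], total_needed: int
-- ) -> dict[str, int]:
--     """Split ``total_needed`` across subreddits as evenly as possible (larger shares first)."""
--     n = len(normalized_subs)
--     if n == 0 or total_needed <= 0:
--         return {}
--     base = total_needed // n
--     rem = total_needed % n
--     return {s: base + (1 if i < rem else 0) for i, s in enumerate(normalized_subs)}
-- ===== SOURCE B (Python) =====
-- def subreddit_quotas_for_total(normalized_subs, total_needed):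
--     """Split total_needed across subreddits, larger shares first (ceiling-division pass)."""
--     n = len(normalized_subs)
--     if n == 0 or total_needed <= 0:
--         return {}
--     quotas = {}
--     remaining = total_needed
--     slots_left = n
--     for s in normalized_subs:
--         share = -(-remaining // slots_left)
--         quotas[s] = share
--         remaining -= share
--         slots_left -= 1
--     return quotas
-- ===== Notes on version B (the rewrite author's own statement) =====
-- stated objective: alternative
-- what changed: Replaces the precomputed base/remainder dict comprehension with a single running pass that maintains remaining total and slots left and assigns each subreddit the ceiling of remaining/slots.
import Mathlib
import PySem

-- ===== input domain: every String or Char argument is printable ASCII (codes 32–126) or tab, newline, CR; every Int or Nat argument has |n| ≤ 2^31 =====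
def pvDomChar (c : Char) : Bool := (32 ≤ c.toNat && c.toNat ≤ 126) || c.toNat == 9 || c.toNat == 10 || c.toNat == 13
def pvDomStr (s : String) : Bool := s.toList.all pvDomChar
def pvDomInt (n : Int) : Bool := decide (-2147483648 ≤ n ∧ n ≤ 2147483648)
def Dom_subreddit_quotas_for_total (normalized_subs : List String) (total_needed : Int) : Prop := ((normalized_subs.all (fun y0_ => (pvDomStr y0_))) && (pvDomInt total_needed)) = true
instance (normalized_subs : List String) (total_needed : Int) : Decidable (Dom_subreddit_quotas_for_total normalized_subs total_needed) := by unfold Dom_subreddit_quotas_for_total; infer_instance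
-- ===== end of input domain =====

-- B replaces A's base/remainder dict comprehension by a single running pass
-- (ceiling of remaining over slots left); same result, alternative decomposition.

-- ===== PORT A =====
def subreddit_quotas_for_total (normalized_subs : List String) (total_needed : Int) : List (String × Int) :=
  let n : Int := normalized_subs.length
  if n = 0 ∨ total_needed ≤ 0 then []
  else
    let base := PySem.Int.floordiv total_needed n
    let rem := PySem.Int.mod total_needed n
    ((PySem.List.enumerate normalized_subs 0).foldl
      (fun (d : PySem.Dict String Int) (p : Int × String) =>
        d.insert p.2 (base + (if p.1 < rem then 1 else 0)))
      PySem.Dict.empty).items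

-- ===== PORT B =====
def subreddit_quotas_for_total_alt (normalized_subs : List String) (total_needed : Int) : List (String × Int) :=
  let n : Int := normalized_subs.length
  if n = 0 ∨ total_needed ≤ 0 then []
  else
    (normalized_subs.foldl
      (fun (st : PySem.Dict String Int × Int × Int) (s : String) =>
        let share := -(PySem.Int.floordiv (-st.2.1) st.2.2)
        (st.1.insert s share, st.2.1 - share, st.2.2 - 1))
      (PySem.Dict.empty, total_needed, n)).1.items

-- ===== PRECONDITION & SPEC =====
def Spec_subreddit_quotas_for_total (normalized_subs : List String) (total_needed : Int) (out : List (String × Int)) : Prop := out = subreddit_quotas_for_total_alt normalized_subs total_needed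
instance (normalized_subs : List String) (total_needed : Int) (out : List (String × Int)) : Decidable (Spec_subreddit_quotas_for_total normalized_subs total_needed out) := by unfold Spec_subreddit_quotas_for_total; infer_instance

-- ===== CLAIM (what is proved, stated in full; the proofs are below) =====
def Claim_equal_subreddit_quotas_for_total : Prop := ∀ (normalized_subs : List String) (total_needed : Int), Dom_subreddit_quotas_for_total normalized_subs total_needed → Spec_subreddit_quotas_for_total normalized_subs total_needed (subreddit_quotas_for_total normalized_subs total_needed)

-- ===== LEMMAS AND PROOFS =====

/-- Ceiling division of `base*s + k` by `s` (with `0 ≤ k ≤ s`, `0 < s`) is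
`base + 1` when `0 < k` and `base` when `k = 0`. -/
theorem ceil_share (base k s : Int) (hs : 0 < s) (hk0 : 0 ≤ k) (hks : k ≤ s) :
    -(PySem.Int.floordiv (-(base * s + k)) s) = base + (if 0 < k then 1 else 0) := by
  rw [PySem.Int.neg_floordiv_neg_eq_iff_of_pos hs]
  split_ifs with h
  · constructor <;> nlinarith
  · constructor <;> nlinarith

/-- Invariant lemma: B's running pass over `l` starting from remaining
`base * l.length + k` and `l.length` slots builds the same dict as A's
comprehension over `enumerate l i0` with cutoff `i0 + k`. -/
theorem main_invariant (base : Int) :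
    ∀ (l : List String) (i0 k : Int) (d : PySem.Dict String Int),
      0 ≤ k → k ≤ l.length →
      (l.foldl
        (fun (st : PySem.Dict String Int × Int × Int) (s : String) =>
          let share := -(PySem.Int.floordiv (-st.2.1) st.2.2)
          (st.1.insert s share, st.2.1 - share, st.2.2 - 1))
        (d, base * l.length + k, (l.length : Int))).1
      = (PySem.List.enumerate l i0).foldl
          (fun (d : PySem.Dict String Int) (p : Int × String) =>
            d.insert p.2 (base + (if p.1 < i0 + k then 1 else 0)))
          d := by
  intro l
  induction l with
  | nil => intro i0 k d _ _; simp [PySem.List.enumerate]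
  | cons s l ih =>
    intro i0 k d hk0 hks
    have hs : (0 : Int) < (s :: l).length := by exact_mod_cast Nat.succ_pos l.length
    rw [PySem.List.enumerate_cons]
    simp only [List.foldl_cons]
    have hshare : -(PySem.Int.floordiv (-(base * ((s :: l).length : Int) + k)) ((s :: l).length : Int))
        = base + (if 0 < k then 1 else 0) := by
      apply ceil_share _ _ _ hs hk0
      simpa using hks
    by_cases hk : 0 < k
    · simp only [hshare, if_pos hk]
      have hstep :
        (base * ((s :: l).length : Int) + k - (base + 1), ((s :: l).length : Int) - 1)
          = (base * (l.length : Int) + (k - 1), (l.length : Int)) := by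
        simp only [List.length_cons, Prod.mk.injEq]
        push_cast
        constructor <;> ring
      rw [hstep, ih (i0 + 1) (k - 1) _ (by omega) (by simp only [List.length_cons] at hks; push_cast at hks; omega)]
      have hco : i0 + 1 + (k - 1) = i0 + k := by ring
      rw [hco]
      have hif : i0 < i0 + k := by omega
      rw [if_pos hif]
    · have hk0' : k = 0 := by omega
      subst hk0'
      simp only [if_neg hk, add_zero] at hshare
      simp only [add_zero, if_neg (lt_irrefl i0)]
      have hstep :
        (base * ((s :: l).length : Int) - base, ((s :: l).length : Int) - 1)
          = (base * (l.length : Int) + 0, (l.length : Int)) := by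
        simp only [List.length_cons, Prod.mk.injEq]
        push_cast
        constructor <;> ring
      rw [hshare, hstep, ih (i0 + 1) 0 _ le_rfl (by positivity)]
      -- both cutoffs are below every index of `enumerate l (i0+1)`
      apply PySem.List.foldl_congr_mem
      intro acc p hp
      rcases (PySem.List.mem_enumerate_iff _ _ _).1 hp with ⟨j, hj, rfl⟩
      have h1 : ¬ ((i0 + 1 + (j : Int)) < i0 + 1 + 0) := by omega
      have h2 : ¬ ((i0 + 1 + (j : Int)) < i0) := by omega
      rw [if_neg h1, if_neg h2]

-- ===== VERDICT (by name: the statement is the Claim_ definition above) =====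
theorem subreddit_quotas_for_total_spec : Claim_equal_subreddit_quotas_for_total := by
  intro subs t _
  unfold Spec_subreddit_quotas_for_total subreddit_quotas_for_total subreddit_quotas_for_total_alt
  by_cases hguard : (subs.length : Int) = 0 ∨ t ≤ 0
  · rw [if_pos hguard, if_pos hguard]
  · rw [if_neg hguard, if_neg hguard]
    rw [not_or, not_le] at hguard
    have hn : (0 : Int) < subs.length := by
      rcases hguard with ⟨h1, _⟩
      have := Int.natCast_nonneg subs.length
      omega
    set base := PySem.Int.floordiv t (subs.length : Int) with hbase
    set rem := PySem.Int.mod t (subs.length : Int) with hrem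
    have hmod : rem = t % (subs.length : Int) := by
      rw [hrem, PySem.Int.mod_eq_emod_of_pos hn]
    have hrem0 : 0 ≤ rem := by rw [hmod]; exact Int.emod_nonneg _ (by omega)
    have hremlt : rem < (subs.length : Int) := by rw [hmod]; exact Int.emod_lt_of_pos _ hn
    have ht : base * (subs.length : Int) + rem = t := by
      rw [hbase, hrem]; exact PySem.Int.floordiv_mul_add_mod t _
    rw [← ht]
    rw [main_invariant base subs 0 rem PySem.Dict.empty hrem0 (le_of_lt hremlt)]
    simp only [zero_add]
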